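-- pv_equiv track=rewrite | github.com/T1moffey/genetic_algotihm_job_shop | exact_job_shop.py | Johnson_Algorithm
-- ===== SOURCE A (Python) =====
-- def Johnson_Algorithm(jobs):
--     schedule_first = []
--     schedule_last = []
--     while jobs:
--         min_job = min(jobs, key=min)
--         if min_job[0] > min_job[1]:
--             schedule_last.append(min_job)
--         else:
--             schedule_first.append(min_job)
--         jobs.remove(min_job)
--     return schedule_first + schedule_last[::-1]
-- ===== SOURCE B (Python) =====
-- # Sort once by min(job) (stable), then a single partition pass -- O(n log n)
-- # instead of A's repeated min+remove selection loop. Return value only: A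
-- # empties its argument list in place; B leaves it untouched.
-- def Johnson_Algorithm(jobs):
--     first = []
--     last = []
--     for job in sorted(jobs, key=min):
--         if job[0] > job[1]:
--             last.append(job)
--         else:
--             first.append(job)
--     return first + last[::-1]
-- ===== Notes on version B (the rewrite author's own statement) =====
-- stated objective: faster
-- what changed: Replaces A's O(n^2) selection loop (repeated min(jobs,key=min) + list.remove) with one stable sort by min(job) followed by a single partition pass; also B does not mutate the caller's list where A empties it.
import Mathlib
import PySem

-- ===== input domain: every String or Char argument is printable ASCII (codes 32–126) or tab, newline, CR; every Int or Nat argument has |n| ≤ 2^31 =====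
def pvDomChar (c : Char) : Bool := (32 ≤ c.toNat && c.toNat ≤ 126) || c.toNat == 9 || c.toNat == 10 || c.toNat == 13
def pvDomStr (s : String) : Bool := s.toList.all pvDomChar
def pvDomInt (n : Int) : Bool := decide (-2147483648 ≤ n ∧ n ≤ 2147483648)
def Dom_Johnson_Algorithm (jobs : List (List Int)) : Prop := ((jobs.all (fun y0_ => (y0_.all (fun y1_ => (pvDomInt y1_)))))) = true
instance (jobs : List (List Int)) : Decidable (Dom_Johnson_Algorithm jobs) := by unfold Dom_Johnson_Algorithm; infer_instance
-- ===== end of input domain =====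

-- B replaces A's O(n^2) selection loop (repeated min + remove) with one stable sort by
-- min(job) and a single partition pass. Return value only: Python A empties its argument
-- list in place, B does not.

-- ===== PORT A =====
-- min(job) (Python raises ValueError on an empty job; Pre_ excludes that, so .getD 0 is unreachable)
def jaKey (j : List Int) : Int := (PySem.List.min? j (fun x => x)).getD 0
-- job[0] / job[1] (Python raises IndexError on a short job; Pre_ excludes that, so .getD 0 is unreachable)
def jaFst (j : List Int) : Int := (PySem.List.pyGet? j 0).getD 0
def jaSnd (j : List Int) : Int := (PySem.List.pyGet? j 1).getD 0

-- the while loop of A; fuel (= initial length) only makes the recursion structural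
def jaGo : Nat → List (List Int) → List (List Int) → List (List Int) → List (List Int)
  | 0, _, schedule_first, schedule_last => schedule_first ++ schedule_last.reverse
  | fuel + 1, jobs, schedule_first, schedule_last =>
    match jobs with
    | [] => schedule_first ++ schedule_last.reverse
    | j :: t =>
      let min_job := (PySem.List.min? (j :: t) jaKey).getD []
      let rest := (PySem.List.remove? (j :: t) min_job).getD []
      if jaFst min_job > jaSnd min_job then
        jaGo fuel rest schedule_first (schedule_last ++ [min_job])
      else
        jaGo fuel rest (schedule_first ++ [min_job]) schedule_last

def Johnson_Algorithm (jobs : List (List Int)) : List (List Int) :=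
  jaGo jobs.length jobs [] []

-- ===== PORT B =====
-- the single partition pass over the sorted list (Source B's for loop)
def jaPart : List (List Int) → List (List Int) → List (List Int) → List (List Int)
  | [], first, last => first ++ last.reverse
  | job :: rest, first, last =>
    if jaFst job > jaSnd job then jaPart rest first (last ++ [job])
    else jaPart rest (first ++ [job]) last

def Johnson_Algorithm_alt (jobs : List (List Int)) : List (List Int) :=
  jaPart (PySem.List.sorted jobs jaKey false) [] []

-- ===== PRECONDITION & SPEC =====
-- A raises (ValueError from min of an empty job, or IndexError from min_job indexing) iff some job has fewer
-- than 2 entries; Pre_ admits exactly the inputs where A returns.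
def Pre_Johnson_Algorithm (jobs : List (List Int)) : Prop := ∀ j ∈ jobs, 2 ≤ j.length
instance (jobs : List (List Int)) : Decidable (Pre_Johnson_Algorithm jobs) := by
  unfold Pre_Johnson_Algorithm; infer_instance
def pvWitness_Johnson_Algorithm : List (List Int) := [[3, 1], [2, 5], [4, 4]]

def Spec_Johnson_Algorithm (jobs : List (List Int)) (out : List (List Int)) : Prop :=
  out = Johnson_Algorithm_alt jobs
instance (jobs : List (List Int)) (out : List (List Int)) : Decidable (Spec_Johnson_Algorithm jobs out) := by
  unfold Spec_Johnson_Algorithm; infer_instance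

-- ===== CLAIM (what is proved, stated in full; the proofs are below) =====
def Claim_equal_Johnson_Algorithm : Prop :=
  ∀ (jobs : List (List Int)), Dom_Johnson_Algorithm jobs → Pre_Johnson_Algorithm jobs →
    Spec_Johnson_Algorithm jobs (Johnson_Algorithm jobs)

-- ===== LEMMAS AND PROOFS =====

-- min over l ++ [z] = one more step of the running-min fold
theorem ja_min_snoc_none (l : List (List Int)) (z : List Int)
    (h : PySem.List.min? l jaKey = none) :
    PySem.List.min? (l ++ [z]) jaKey = some z := by
  unfold PySem.List.min? at h ⊢
  rw [List.foldl_append, h]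
  rfl

theorem ja_min_snoc_some (l : List (List Int)) (z m : List Int)
    (h : PySem.List.min? l jaKey = some m) :
    PySem.List.min? (l ++ [z]) jaKey =
      (if jaKey z < jaKey m then some z else some m) := by
  unfold PySem.List.min? at h ⊢
  rw [List.foldl_append, h]
  rfl

-- sorted (l ++ [z]) = insert z into sorted l
theorem ja_sorted_snoc (l : List (List Int)) (z : List Int) :
    PySem.List.sorted (l ++ [z]) jaKey false =
      PySem.List.insertBy (fun a b => decide (jaKey a < jaKey b)) z
        (PySem.List.sorted l jaKey false) := by
  rw [PySem.List.sorted_eq_foldl_insertBy, PySem.List.sorted_eq_foldl_insertBy,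
    List.foldl_append]
  rfl

-- the selection step: the first minimal element heads the stable sort
theorem ja_sel (xs : List (List Int)) :
    ∀ m, PySem.List.min? xs jaKey = some m →
      PySem.List.sorted xs jaKey false = m :: PySem.List.sorted (xs.erase m) jaKey false := by
  induction xs using List.reverseRecOn with
  | nil => intro m h; simp [PySem.List.min?] at h
  | append_singleton ys z ih =>
    intro m h
    cases hy : PySem.List.min? ys jaKey with
    | none =>
      have hnil : ys = [] := (PySem.List.min?_eq_none_iff ys jaKey).mp hy
      subst hnil
      rw [ja_min_snoc_none [] z hy] at h
      obtain rfl : m = z := (Option.some_inj.mp h).symm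
      simp [PySem.List.sorted, PySem.List.insertBy]
    | some m' =>
      rw [ja_min_snoc_some ys z m' hy] at h
      by_cases hlt : jaKey z < jaKey m'
      · simp [hlt] at h
        obtain rfl : m = z := h.symm
        have hznot : m ∉ ys := by
          intro hmem
          have := PySem.List.min?_isMin hy m hmem
          omega
        rw [List.erase_append_right _ hznot]
        simp only [List.erase_cons_head]
        rw [ja_sorted_snoc]
        cases hs : PySem.List.sorted ys jaKey false with
        | nil =>
          have : ys = [] := (PySem.List.sorted_eq_nil_iff ys jaKey false).mp hs
          subst this
          simp [PySem.List.min?] at hy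
        | cons hd tl =>
          have hhd : hd ∈ ys := by
            have : hd ∈ PySem.List.sorted ys jaKey false := by rw [hs]; simp
            exact (PySem.List.mem_sorted ys jaKey false hd).mp this
          have h1 : jaKey m' ≤ jaKey hd := PySem.List.min?_isMin hy hd hhd
          have h2 : jaKey m < jaKey hd := by omega
          simp [PySem.List.insertBy, h2, hs]
      · simp [hlt] at h
        obtain rfl : m = m' := h.symm
        have hmem : m ∈ ys := PySem.List.min?_mem hy
        rw [List.erase_append_left _ hmem]
        rw [ja_sorted_snoc, ih m hy]
        rw [ja_sorted_snoc]
        simp [PySem.List.insertBy, hlt]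

-- loop ↔ sort-then-partition
theorem ja_go_eq : ∀ (fuel : Nat) (jobs first last : List (List Int)),
    jobs.length ≤ fuel →
    jaGo fuel jobs first last = jaPart (PySem.List.sorted jobs jaKey false) first last := by
  intro fuel
  induction fuel with
  | zero =>
    intro jobs first last h
    have : jobs = [] := List.eq_nil_of_length_eq_zero (Nat.le_zero.mp h)
    subst this
    simp [jaGo, jaPart, PySem.List.sorted]
  | succ fuel ih =>
    intro jobs first last h
    match jobs with
    | [] => simp [jaGo, jaPart, PySem.List.sorted]
    | j :: t =>
      cases hmin : PySem.List.min? (j :: t) jaKey with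
      | none => simp [PySem.List.min?_eq_none_iff] at hmin
      | some m =>
        have hmem : m ∈ j :: t := PySem.List.min?_mem hmin
        have hrem : PySem.List.remove? (j :: t) m = some ((j :: t).erase m) :=
          PySem.List.remove?_eq_some_erase _ m hmem
        have hlen : ((j :: t).erase m).length ≤ fuel := by
          rw [List.length_erase_of_mem hmem]
          simp at h ⊢
          omega
        rw [ja_sel (j :: t) m hmin]
        show (if jaFst ((PySem.List.min? (j :: t) jaKey).getD []) >
                 jaSnd ((PySem.List.min? (j :: t) jaKey).getD []) then
               jaGo fuel ((PySem.List.remove? (j :: t)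
                 ((PySem.List.min? (j :: t) jaKey).getD [])).getD []) first
                 (last ++ [(PySem.List.min? (j :: t) jaKey).getD []])
             else
               jaGo fuel ((PySem.List.remove? (j :: t)
                 ((PySem.List.min? (j :: t) jaKey).getD [])).getD [])
                 (first ++ [(PySem.List.min? (j :: t) jaKey).getD []]) last) = _
        rw [hmin]
        simp only [Option.getD_some, hrem, jaPart]
        split_ifs with hc
        · exact ih _ _ _ hlen
        · exact ih _ _ _ hlen

-- ===== VERDICT (by name: the statement is the Claim_ definition above) =====
theorem Johnson_Algorithm_spec : Claim_equal_Johnson_Algorithm := by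
  intro jobs _ _
  unfold Spec_Johnson_Algorithm Johnson_Algorithm Johnson_Algorithm_alt
  exact ja_go_eq jobs.length jobs [] [] le_rfl
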